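-- pv_equiv track=rewrite | github.com/mariogemoll/adventofcode2024 | 4/4a.py | get_right_to_left_diagonals
-- ===== SOURCE A (Python) =====
-- def get_rtl_diag(input, start_row, start_col):
--     row = start_row
--     col = start_col
--     result = []
--     while True:
--         if row >= len(input) or col < 0:
--             break
--         result.append(input[row][col])
--         row += 1
--         col -= 1
--     return "".join(result)
--
-- def get_right_to_left_diagonals(input):
--     num_cols = len(input[0])
--
--     diagonals = []
--
--     # In the first row, we need to extract diagonals starting from each cell
--     for col in range(num_cols - 1, -1, -1):
--         diagonals.append(get_rtl_diag(input, 0, col))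
--
--     # For all other rows, we just need the diagonal starting from the last cell
--     for row in range(1, num_cols):
--         diagonals.append(get_rtl_diag(input, row, num_cols - 1))
--     return diagonals
-- ===== SOURCE B (Python) =====
-- def get_right_to_left_diagonals(input):
--     # One row-major pass: bucket every cell of the num_cols-wide grid by its
--     # anti-diagonal sum r+c, then emit the sums in A's order.
--     num_cols = len(input[0])
--     cells = [(r + c, row[c]) for r, row in enumerate(input)
--              for c in range(min(len(row), num_cols))]
--     table = {}
--     for s, ch in cells:
--         table.setdefault(s, []).append(ch)
--     order = list(range(num_cols - 1, -1, -1)) + list(range(num_cols, 2 * num_cols - 1))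
--     return ["".join(table.get(s, [])) for s in order]
-- ===== Notes on version B (the rewrite author's own statement) =====
-- stated objective: alternative
-- what changed: Replaces A's per-diagonal while-loop walks (one walk started per diagonal) by a single row-major pass that buckets every cell under its anti-diagonal sum r+c in a dict, then reads the buckets off in A's diagonal order.
import Mathlib
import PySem

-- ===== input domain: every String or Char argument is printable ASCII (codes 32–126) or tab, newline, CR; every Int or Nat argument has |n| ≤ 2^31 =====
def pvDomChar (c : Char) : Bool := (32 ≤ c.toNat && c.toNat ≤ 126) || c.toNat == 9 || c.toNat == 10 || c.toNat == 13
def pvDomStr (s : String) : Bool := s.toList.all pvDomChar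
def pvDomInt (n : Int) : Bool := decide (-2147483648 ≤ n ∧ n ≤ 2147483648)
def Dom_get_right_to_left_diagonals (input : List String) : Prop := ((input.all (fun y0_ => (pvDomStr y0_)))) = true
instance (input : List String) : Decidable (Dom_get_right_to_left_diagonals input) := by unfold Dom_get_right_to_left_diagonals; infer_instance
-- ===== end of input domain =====

-- B replaces A's per-diagonal while-loop walks by one row-major pass bucketing cells by anti-diagonal sum (alternative decomposition, same cost).

-- ===== PORT A =====
def get_rtl_diag_go (input : List String) (row col : Int) (result : List Char) : List Char :=
  if row ≥ PySem.List.len input ∨ col < 0 then result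
  else get_rtl_diag_go input (row + 1) (col - 1)
        (result ++ [PySem.List.pyGetD (PySem.List.pyGetD input row "").toList col ' '])
termination_by (PySem.List.len input - row).toNat
decreasing_by simp only [PySem.List.len_eq] at *; omega

def get_rtl_diag (input : List String) (start_row start_col : Int) : String :=
  String.ofList (get_rtl_diag_go input start_row start_col [])

def get_right_to_left_diagonals (input : List String) : List String :=
  let num_cols : Int := PySem.Str.len (PySem.List.pyGetD input 0 "")
  ((PySem.List.pyRange (num_cols - 1) (-1) (-1)).map (fun col => get_rtl_diag input 0 col))
    ++ ((PySem.List.pyRange 1 num_cols 1).map (fun row => get_rtl_diag input row (num_cols - 1)))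

-- ===== PORT B =====
def get_right_to_left_diagonals_alt (input : List String) : List String :=
  let num_cols : Int := PySem.Str.len (PySem.List.pyGetD input 0 "")
  let cells : List (Int × Char) :=
    (PySem.List.enumerate input 0).flatMap (fun p =>
      (PySem.List.pyRange 0 (min (PySem.Str.len p.2) num_cols) 1).map
        (fun c => (p.1 + c, PySem.List.pyGetD p.2.toList c ' ')))
  let table := cells.foldl (fun d p => d.modify p.1 [] (· ++ [p.2])) PySem.Dict.empty
  let order := PySem.List.pyRange (num_cols - 1) (-1) (-1)
                 ++ PySem.List.pyRange num_cols (2 * num_cols - 1) 1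
  order.map (fun s => String.ofList (table.getD s []))

-- ===== PRECONDITION & SPEC =====
-- Pre_ excludes exactly the inputs on which A raises IndexError: the empty list
-- (len(input[0])), and ragged inputs where some diagonal walk reads past the end of a row.
def Pre_get_right_to_left_diagonals (input : List String) : Prop :=
  input ≠ [] ∧
  ∀ r < input.length, ∀ c < (input.getD 0 "").toList.length,
    (r : Int) + c ≤ 2 * ((input.getD 0 "").toList.length : Int) - 2 →
    c < (input.getD r "").toList.length
instance (input : List String) : Decidable (Pre_get_right_to_left_diagonals input) := by
  unfold Pre_get_right_to_left_diagonals; infer_instance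

def pvWitness_get_right_to_left_diagonals : List String := ["ab", "cd"]

def Spec_get_right_to_left_diagonals (input : List String) (out : List String) : Prop := out = get_right_to_left_diagonals_alt input
instance (input : List String) (out : List String) : Decidable (Spec_get_right_to_left_diagonals input out) := by unfold Spec_get_right_to_left_diagonals; infer_instance

-- ===== CLAIM (what is proved, stated in full; the proofs are below) =====
def Claim_equal_get_right_to_left_diagonals : Prop := ∀ (input : List String), Dom_get_right_to_left_diagonals input → Pre_get_right_to_left_diagonals input → Spec_get_right_to_left_diagonals input (get_right_to_left_diagonals input)

-- ===== LEMMAS AND PROOFS =====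

-- chars appearing on anti-diagonal s, scanning rows (with absolute index from `start`) top-down
def gatherRows (rows : List String) (start : Int) (nc : Int) (s : Int) : List Char :=
  (PySem.List.enumerate rows start).flatMap (fun p =>
    if 0 ≤ s - p.1 ∧ s - p.1 < min (p.2.toList.length : Int) nc then
      [PySem.List.pyGetD p.2.toList (s - p.1) ' '] else [])

-- A's while-loop over the suffix of rows
def walk : List String → Int → List Char
  | [], _ => []
  | row :: rest, col =>
      if col < 0 then [] else PySem.List.pyGetD row.toList col ' ' :: walk rest (col - 1)

theorem go_eq_walk (input : List String) : ∀ (n : Nat) (row : Nat) (col : Int) (acc : List Char),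
    n = input.length - row →
    get_rtl_diag_go input row col acc = acc ++ walk (input.drop row) col := by
  intro n
  induction n with
  | zero =>
    intro row col acc h
    rw [get_rtl_diag_go]
    have hlen : input.length ≤ row := by omega
    rw [if_pos (Or.inl (by simp [PySem.List.len_eq]; exact_mod_cast hlen))]
    rw [List.drop_eq_nil_of_le hlen]
    simp [walk]
  | succ m ih =>
    intro row col acc h
    rw [get_rtl_diag_go]
    by_cases hrow : input.length ≤ row
    · rw [if_pos (Or.inl (by simp [PySem.List.len_eq]; exact_mod_cast hrow))]
      rw [List.drop_eq_nil_of_le hrow]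
      simp [walk]
    · have hlt : row < input.length := by omega
      have hdrop : input.drop row = input[row] :: input.drop (row + 1) :=
        List.drop_eq_getElem_cons hlt
      by_cases hcol : col < 0
      · rw [if_pos (Or.inr hcol), hdrop]
        simp [walk, hcol]
      · rw [if_neg (by simp [PySem.List.len_eq]; constructor <;> omega)]
        have : ((row : Int) + 1) = ((row + 1 : Nat) : Int) := by push_cast; ring
        rw [this, ih (row + 1) (col - 1) _ (by omega)]
        rw [hdrop]
        simp only [walk, if_neg hcol]
        have hget : PySem.List.pyGetD input (row : Int) "" = input[row] := by
          rw [PySem.List.pyGetD_natCast]; simp [List.getD, hlt]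
        rw [hget]
        simp

theorem gather_nil (rows : List String) : ∀ (start nc s : Int),
    (∀ (k : Nat), k < rows.length → nc ≤ s - (start + k) ∨ s - (start + k) < 0) →
    gatherRows rows start nc s = [] := by
  induction rows with
  | nil => intro start nc s _; simp [gatherRows, PySem.List.enumerate_nil]
  | cons row rest ih =>
    intro start nc s h
    have h0 := h 0 (by simp)
    simp only [Nat.cast_zero, add_zero] at h0
    unfold gatherRows
    rw [PySem.List.enumerate_cons]
    simp only [List.flatMap_cons]
    rw [if_neg (by
      rintro ⟨h1, h2⟩
      have := lt_of_lt_of_le h2 (min_le_right _ _)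
      omega)]
    simp only [List.nil_append]
    exact ih (start + 1) nc s (fun k hk => by
      have := h (k + 1) (by simpa using Nat.succ_lt_succ hk)
      push_cast at this ⊢; omega)

theorem walk_eq_gather (nc : Nat) : ∀ (rows : List String) (start c0 : Int),
    c0 < (nc : Int) →
    (∀ (k : Nat) (hk : k < rows.length), 0 ≤ c0 - k → (c0 - k) < (rows[k].toList.length : Int)) →
    walk rows c0 = gatherRows rows start nc (start + c0) := by
  intro rows
  induction rows with
  | nil => intro start c0 _ _; simp [walk, gatherRows, PySem.List.enumerate_nil]
  | cons row rest ih =>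
    intro start c0 hc0 h
    unfold gatherRows
    rw [PySem.List.enumerate_cons]
    simp only [List.flatMap_cons]
    by_cases hcol : c0 < 0
    · simp only [walk, if_pos hcol]
      rw [if_neg (by rintro ⟨h1, h2⟩; omega)]
      simp only [List.nil_append]
      exact (gather_nil rest (start + 1) nc (start + c0) (fun k hk => by omega)).symm
    · have h0 := h 0 (by simp) (by omega)
      simp only [Nat.cast_zero, sub_zero] at h0
      simp only [walk, if_neg hcol]
      have hcond : 0 ≤ start + c0 - start ∧ start + c0 - start < min ((row.toList.length : Int)) nc := by
        constructor
        · omega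
        · simp only [lt_min_iff]
          constructor
          · simpa using h0
          · omega
      rw [if_pos hcond]
      have harg : start + c0 - start = c0 := by ring
      rw [harg]
      simp only [List.cons_append, List.nil_append]
      congr 1
      have : start + c0 = (start + 1) + (c0 - 1) := by ring
      rw [this]
      exact ih (start + 1) (c0 - 1) (by omega) (fun k hk hge => by
        have := h (k + 1) (by simpa using Nat.succ_lt_succ hk) (by push_cast; omega)
        simp only [List.getElem_cons_succ] at this
        push_cast at this ⊢
        omega)

theorem pyRange_filter_fuel : ∀ (n : Nat) (a v : Int),
    (PySem.List.pyRange a (a + n) 1).filter (fun c => v == c) =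
      if a ≤ v ∧ v < a + n then [v] else [] := by
  intro n
  induction n with
  | zero =>
    intro a v
    rw [PySem.List.pyRange_one_eq_nil (by omega)]
    rw [if_neg (by omega)]
    simp
  | succ m ih =>
    intro a v
    rw [PySem.List.pyRange_one_cons (by omega)]
    rw [List.filter_cons]
    have harg : a + ((m + 1 : Nat) : Int) = (a + 1) + (m : Nat) := by push_cast; ring
    by_cases hv : v = a
    · subst hv
      simp only [BEq.rfl, if_pos]
      rw [harg, ih (v + 1) v, if_neg (by omega), if_pos (by constructor <;> omega)]
    · rw [if_neg (by simp [hv])]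
      rw [harg, ih (a + 1) v]
      by_cases hin : a + 1 ≤ v ∧ v < a + 1 + (m : Nat)
      · rw [if_pos hin, if_pos (by omega)]
      · rw [if_neg hin, if_neg (by omega)]

theorem pyRange_filter_beq (a b v : Int) :
    (PySem.List.pyRange a b 1).filter (fun c => v == c) =
      if a ≤ v ∧ v < b then [v] else [] := by
  by_cases hab : b ≤ a
  · rw [PySem.List.pyRange_one_eq_nil hab, if_neg (by omega)]
    simp
  · have hb : b = a + ((b - a).toNat : Int) := by omega
    rw [hb, pyRange_filter_fuel]

theorem gather_append (xs ys : List String) (start nc s : Int) :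
    gatherRows (xs ++ ys) start nc s =
      gatherRows xs start nc s ++ gatherRows ys (start + xs.length) nc s := by
  unfold gatherRows
  rw [PySem.List.enumerate_append, List.flatMap_append]

theorem cells_filter (nc : Nat) : ∀ (rows : List String) (start s : Int),
    (((PySem.List.enumerate rows start).flatMap (fun p =>
        (PySem.List.pyRange 0 (min (PySem.Str.len p.2) (nc : Int)) 1).map
          (fun c => (p.1 + c, PySem.List.pyGetD p.2.toList c ' ')))).filter
       (fun p => p.1 == s)).map (fun x => x.2) = gatherRows rows start nc s := by
  intro rows
  induction rows with
  | nil => intro start s; simp [gatherRows, PySem.List.enumerate_nil]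
  | cons row rest ih =>
    intro start s
    rw [PySem.List.enumerate_cons]
    simp only [List.flatMap_cons, List.filter_append, List.map_append]
    have htail : gatherRows (row :: rest) start nc s =
        (if 0 ≤ s - start ∧ s - start < min ((row.toList.length : Int)) nc then
          [PySem.List.pyGetD row.toList (s - start) ' '] else []) ++ gatherRows rest (start + 1) nc s := by
      unfold gatherRows
      rw [PySem.List.enumerate_cons]
      simp
    rw [htail]
    congr 1
    · rw [List.filter_map]
      have hpred : ∀ c ∈ PySem.List.pyRange 0 (min (PySem.Str.len row) (nc : Int)) 1,
          ((fun p => p.1 == s) ∘ (fun c => (start + c, PySem.List.pyGetD row.toList c ' '))) c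
            = ((s - start) == c) := by
        intro c _
        simp only [Function.comp_apply]
        by_cases h : start + c = s
        · simp [h]; omega
        · rw [Bool.eq_iff_iff]
          simp only [beq_iff_eq]
          omega
      rw [List.filter_congr hpred]
      rw [pyRange_filter_beq 0 (min (PySem.Str.len row) (nc : Int)) (s - start)]
      rw [PySem.Str.len_eq]
      by_cases hc : 0 ≤ s - start ∧ s - start < min ((row.toList.length : Int)) nc
      · rw [if_pos hc, if_pos hc]
        simp
      · rw [if_neg hc, if_neg hc]
        simp
    · exact ih (start + 1) s

theorem diag_eq (input : List String) (nc : Nat)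
    (hacc : ∀ r < input.length, ∀ c < nc, (r : Int) + c ≤ 2 * (nc : Int) - 2 →
              c < (input.getD r "").toList.length)
    (r0 : Nat) (c0 : Int) (h0 : 0 ≤ c0) (h1 : c0 < (nc : Int))
    (h2 : (r0 : Int) + c0 ≤ 2 * (nc : Int) - 2)
    (hpref : ∀ r : Nat, r < r0 → (nc : Int) ≤ (r0 : Int) + c0 - r) :
    get_rtl_diag_go input (r0 : Int) c0 [] = gatherRows input 0 nc ((r0 : Int) + c0) := by
  rw [go_eq_walk input (input.length - r0) r0 c0 [] rfl]
  simp only [List.nil_append]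
  by_cases hr : r0 ≤ input.length
  · have hhyp : ∀ (k : Nat) (hk : k < (input.drop r0).length), 0 ≤ c0 - k →
        (c0 - k) < (((input.drop r0)[k].toList.length : Int)) := by
      intro k hk hge
      have hk' : r0 + k < input.length := by simp at hk; omega
      rw [List.getElem_drop]
      have hc := hacc (r0 + k) hk' (c0 - (k : Int)).toNat (by omega) (by push_cast; omega)
      have hgd : input.getD (r0 + k) "" = input[r0 + k] := by
        simp [List.getD, hk']
      rw [hgd] at hc
      omega
    rw [walk_eq_gather nc (input.drop r0) (r0 : Int) c0 h1 hhyp]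
    conv_rhs => rw [← List.take_append_drop r0 input]
    rw [gather_append]
    rw [gather_nil (List.take r0 input) 0 nc ((r0 : Int) + c0) (fun k hk => by
      simp only [List.length_take] at hk
      exact Or.inl (by have := hpref k (by omega); omega))]
    rw [List.length_take, min_eq_left hr]
    simp
  · rw [List.drop_eq_nil_of_le (by omega)]
    rw [gather_nil input 0 nc ((r0 : Int) + c0) (fun k hk => by
      exact Or.inl (by have := hpref k (by omega); omega))]
    simp [walk]

-- ===== VERDICT (by name: the statement is the Claim_ definition above) =====
theorem get_right_to_left_diagonals_spec : Claim_equal_get_right_to_left_diagonals := by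
  intro input _ hpre
  obtain ⟨hne, hacc⟩ := hpre
  unfold Spec_get_right_to_left_diagonals
  unfold get_right_to_left_diagonals get_right_to_left_diagonals_alt
  have hlen : PySem.Str.len (PySem.List.pyGetD input 0 "") = (((input.getD 0 "").toList.length : Nat) : Int) := by
    rw [PySem.List.pyGetD_zero, PySem.Str.len_eq]
  set nc : Nat := (input.getD 0 "").toList.length with hnc
  simp only [hlen]
  rw [List.map_append]
  have hB : ∀ s : Int,
      String.ofList (((PySem.List.enumerate input 0).flatMap (fun p =>
          (PySem.List.pyRange 0 (min (PySem.Str.len p.2) (nc : Int)) 1).map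
            (fun c => (p.1 + c, PySem.List.pyGetD p.2.toList c ' ')))).foldl
          (fun d p => d.modify p.1 [] (· ++ [p.2])) PySem.Dict.empty |>.getD s [])
        = String.ofList (gatherRows input 0 nc s) := by
    intro s
    rw [PySem.Dict.getD_foldl_modify_append, PySem.Dict.getD_empty, List.nil_append]
    rw [cells_filter nc input 0 s]
  congr 1
  · apply List.map_congr_left
    intro s hs
    rw [PySem.List.mem_pyRange_neg_one] at hs
    rw [hB s]
    unfold get_rtl_diag
    have hd := diag_eq input nc hacc 0 s (by omega) (by omega) (by omega) (by omega)
    simp only [Nat.cast_zero, zero_add] at hd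
    rw [hd]
  · rw [PySem.List.pyRange_one 1 (nc : Int), PySem.List.pyRange_one (nc : Int) (2 * (nc : Int) - 1)]
    have harg : (2 * (nc : Int) - 1 - nc).toNat = ((nc : Int) - 1).toNat := by omega
    rw [harg]
    rw [List.map_map, List.map_map]
    apply List.map_congr_left
    intro k hk
    rw [List.mem_range] at hk
    simp only [Function.comp_apply]
    rw [hB ((nc : Int) + k)]
    unfold get_rtl_diag
    have hcast : (1 : Int) + (k : Nat) = (((k + 1 : Nat) : Nat) : Int) := by push_cast; ring
    rw [hcast]
    have hd := diag_eq input nc hacc (k + 1) ((nc : Int) - 1)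
      (by omega) (by omega) (by push_cast; omega)
      (fun r hr => by push_cast; omega)
    have harg2 : ((k + 1 : Nat) : Int) + ((nc : Int) - 1) = (nc : Int) + k := by push_cast; ring
    rw [harg2] at hd
    rw [hd]
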